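-- pv_equiv track=rewrite | github.com/lopuhin/ru-jungle | main.py | clean_subtitles_lines
-- ===== SOURCE A (Python) =====
-- from typing import List, Dict, Optional
--
-- def clean_subtitles_lines(lines: List[str]) -> List[str]:
--     cleaned = []
--     for i, line in enumerate(lines):
--         line = line.strip()
--         next_line = '' if i == len(lines) - 1 else lines[i + 1]
--         prev_line = '' if i == 0 else lines[i - 1]
--         # remove ... \n ...
--         if line.endswith('...') and next_line.startswith('...'):
--             line = line.rstrip('...').strip()
--         if line.startswith('...') and prev_line.endswith('...'):
--             line = line.lstrip('...').strip()
--         # join lines starting with lower case letter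
--         # (but lines with ... are not joined)
--         if (i and line and cleaned and
--                 line[0].isalpha() and line[0].islower() and
--                 not cleaned[-1].endswith('.')):
--             cleaned[-1] = cleaned[-1] + ' ' + line
--         else:
--             cleaned.append(line)
--     return cleaned
-- ===== SOURCE B (Python) =====
-- def clean_subtitles_lines(lines):
--     # Pass 1: per-line ellipsis/strip transform against the raw neighbours.
--     n = len(lines)
--
--     def transform(i):
--         line = lines[i].strip()
--         nxt = lines[i + 1] if i + 1 < n else ''
--         prev = lines[i - 1] if i > 0 else ''
--         if line.endswith('...') and nxt.startswith('...'):
--             line = line.rstrip('...').strip()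
--         if line.startswith('...') and prev.endswith('...'):
--             line = line.lstrip('...').strip()
--         return line
--
--     t = [transform(i) for i in range(n)]
--     # Pass 2: build the result BACK-TO-FRONT.  Walking the transformed lines
--     # in reverse, a line is glued onto the front of the following group when
--     # that group starts with a lower-case letter and the line does not end
--     # with '.'.  (The join decision is local: a group starts with a
--     # lower-case letter exactly when its first raw line does.)
--     out = []  # groups in reverse order: out[-1] is the earliest group so far
--     for line in reversed(t):
--         if (out and out[-1] and out[-1][0].isalpha() and out[-1][0].islower()
--                 and not line.endswith('.')):
--             out[-1] = line + ' ' + out[-1]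
--         else:
--             out.append(line)
--     out.reverse()
--     return out
-- ===== Notes on version B (the rewrite author's own statement) =====
-- stated objective: alternative
-- what changed: A builds the output left-to-right, merging each lowercase continuation into the growing output's last line; B first transforms each line against its raw neighbours, then builds the result back-to-front by walking the transformed lines in reverse and gluing a line onto the FRONT of the following group when that group starts with a lower-case letter (using the locality fact that a group's first character is its first raw line's first character), so the join test never consults the growing left output.
import Mathlib
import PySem

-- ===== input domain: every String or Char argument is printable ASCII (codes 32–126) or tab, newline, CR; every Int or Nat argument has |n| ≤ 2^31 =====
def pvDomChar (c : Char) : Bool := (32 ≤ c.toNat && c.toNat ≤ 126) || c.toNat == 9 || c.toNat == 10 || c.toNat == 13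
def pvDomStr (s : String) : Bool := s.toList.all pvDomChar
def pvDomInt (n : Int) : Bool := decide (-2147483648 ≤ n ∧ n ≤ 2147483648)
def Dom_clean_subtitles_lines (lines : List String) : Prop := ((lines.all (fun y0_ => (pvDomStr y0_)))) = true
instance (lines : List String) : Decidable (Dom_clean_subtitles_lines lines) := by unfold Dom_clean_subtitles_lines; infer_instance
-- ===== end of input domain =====

-- B replaces A's left-to-right loop (which merges continuations into the growing output's last line)
-- by a per-index transform pass followed by a REVERSED walk that glues a line onto the FRONT of the
-- following group (objective: alternative decomposition, same cost).

-- ===== PORT A =====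
-- '...' as a strip character set (rstrip/lstrip strip CHARACTERS, here just '.')
def pvDots : List Char := ['.', '.', '.']  -- shared by both ports

-- one iteration of A's loop; `ls` is the whole input (for the raw-neighbour reads), p = (i, line).
-- `lines[i+1]`/`lines[i-1]` are in range when read (guarded by the ifs), so pyGetD is exact;
-- rstrip('...')/lstrip('...') are hand-ported as right/left dropWhile over the character set (exact).
def pvStepA (ls : List (List Char)) (cleaned : List (List Char)) (p : Int × List Char) : List (List Char) :=
  let i := p.1
  let line1 := PySem.Chars.strip p.2
  let next_line := if i = (ls.length : Int) - 1 then [] else PySem.List.pyGetD ls (i + 1) []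
  let prev_line := if i = 0 then [] else PySem.List.pyGetD ls (i - 1) []
  let line2 := if PySem.Chars.endswith line1 pvDots && PySem.Chars.startswith next_line pvDots
               then PySem.Chars.strip ((line1.reverse.dropWhile (pvDots.contains ·)).reverse) else line1
  let line3 := if PySem.Chars.startswith line2 pvDots && PySem.Chars.endswith prev_line pvDots
               then PySem.Chars.strip (line2.dropWhile (pvDots.contains ·)) else line2
  if decide (i ≠ 0) && !line3.isEmpty && !cleaned.isEmpty
      && PySem.Chars.isalpha (line3.headD ' ') && PySem.Chars.islower (line3.headD ' ')
      && !PySem.Chars.endswith (cleaned.getLastD []) ['.']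
  then cleaned.dropLast ++ [cleaned.getLastD [] ++ [' '] ++ line3]
  else cleaned ++ [line3]

def clean_subtitles_lines (lines : List String) : List String :=
  let ls := lines.map String.toList
  ((PySem.List.enumerate ls 0).foldl (pvStepA ls) []).map String.ofList

-- ===== PORT B =====
-- Source B's inner `transform` logic on (prev, line, next); rstrip/lstrip over the '...' character
-- set hand-ported as right/left dropWhile (exact, as in port A)
def pvTransformB (prev line next : List Char) : List Char :=
  let l1 := PySem.Chars.strip line
  let l2 := if PySem.Chars.endswith l1 pvDots && PySem.Chars.startswith next pvDots
            then PySem.Chars.strip ((l1.reverse.dropWhile (pvDots.contains ·)).reverse) else l1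
  if PySem.Chars.startswith l2 pvDots && PySem.Chars.endswith prev pvDots
  then PySem.Chars.strip (l2.dropWhile (pvDots.contains ·)) else l2

-- Source B's `transform(i)`: neighbour reads `lines[i±1] if in range else ''`
def pvTB (ls : List (List Char)) (k : Nat) : List Char :=
  pvTransformB (if k = 0 then [] else ls.getD (k - 1) []) (ls.getD k [])
               (if k + 1 < ls.length then ls.getD (k + 1) [] else [])

-- `out[-1] and out[-1][0].isalpha() and out[-1][0].islower()` (truthiness of out[-1] guards the index)
def pvHeadOK (g : List Char) : Bool :=
  !g.isEmpty && PySem.Chars.isalpha (g.headD ' ') && PySem.Chars.islower (g.headD ' ')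

-- Source B's reversed-loop body: `out` holds the groups in reverse order (out[-1] = earliest group)
def pvRevStep (out : List (List Char)) (line : List Char) : List (List Char) :=
  if !out.isEmpty && pvHeadOK (out.getLastD []) && !PySem.Chars.endswith line ['.']
  then out.dropLast ++ [line ++ [' '] ++ out.getLastD []]
  else out ++ [line]

def clean_subtitles_lines_alt (lines : List String) : List String :=
  let ls := lines.map String.toList
  let t := (List.range ls.length).map (pvTB ls)
  (((t.reverse).foldl pvRevStep []).reverse).map String.ofList

-- ===== PRECONDITION & SPEC =====
def Spec_clean_subtitles_lines (lines : List String) (out : List String) : Prop := out = clean_subtitles_lines_alt lines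
instance (lines : List String) (out : List String) : Decidable (Spec_clean_subtitles_lines lines out) := by unfold Spec_clean_subtitles_lines; infer_instance

-- ===== CLAIM (what is proved, stated in full; the proofs are below) =====
def Claim_equal_clean_subtitles_lines : Prop := ∀ (lines : List String), Dom_clean_subtitles_lines lines → Spec_clean_subtitles_lines lines (clean_subtitles_lines lines)

-- ===== LEMMAS AND PROOFS =====

-- proof-only intermediate: A's loop body once the raw-neighbour transform is factored out
def pvJoinStepB (cleaned : List (List Char)) (line : List Char) : List (List Char) :=
  if !line.isEmpty && !cleaned.isEmpty
      && PySem.Chars.isalpha (line.headD ' ') && PySem.Chars.islower (line.headD ' ')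
      && !PySem.Chars.endswith (cleaned.getLastD []) ['.']
  then cleaned.dropLast ++ [cleaned.getLastD [] ++ [' '] ++ line]
  else cleaned ++ [line]

-- proof-only: B's reversed loop read as structural recursion (output built back-to-front)
def pvRecB : List (List Char) → List (List Char)
  | [] => []
  | l :: rest =>
    let out := pvRecB rest
    if !out.isEmpty && pvHeadOK (out.headD []) && !PySem.Chars.endswith l ['.']
    then (l ++ [' '] ++ out.headD []) :: out.tail
    else l :: out

-- proof-only: gluing a finished left part onto a back-to-front result
def pvGlue (acc out : List (List Char)) : List (List Char) :=
  if !acc.isEmpty && !out.isEmpty && pvHeadOK (out.headD []) && !PySem.Chars.endswith (acc.getLastD []) ['.']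
  then acc.dropLast ++ ((acc.getLastD [] ++ [' '] ++ out.headD []) :: out.tail)
  else acc ++ out

lemma pvGetD_eq {α : Type} (l : List α) (k : Nat) (d : α) (h : k < l.length) :
    l.getD k d = l[k] := by
  rw [List.getD_eq_getElem?_getD, List.getElem?_eq_getElem h]; rfl

lemma pvStep_eq_zero (ls : List (List Char)) (h : 0 < ls.length) :
    pvStepA ls [] (0, ls.getD 0 []) = pvJoinStepB [] (pvTB ls 0) := by
  unfold pvStepA pvJoinStepB pvTB pvTransformB pvDots
  by_cases hk : 0 + 1 < ls.length
  · simp [hk, PySem.List.pyGetD_ofNat',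
      show ¬ ((0 : Int) = (ls.length : Int) - 1) by omega]
  · simp [hk, show ((0 : Int) = (ls.length : Int) - 1) by omega]

lemma pvStep_eq (ls : List (List Char)) (k : Nat) (acc : List (List Char))
    (h1 : 1 ≤ k) (h2 : k < ls.length) :
    pvStepA ls acc ((k : Int), ls.getD k []) = pvJoinStepB acc (pvTB ls k) := by
  have hk0 : ¬ ((k : Int) = 0) := by omega
  have hkne : (decide ((k : Int) ≠ 0)) = true := decide_eq_true hk0
  have hcast1 : ((k : Int) + 1) = ((k + 1 : Nat) : Int) := by push_cast; ring
  have hcast2 : ((k : Int) - 1) = ((k - 1 : Nat) : Int) := by omega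
  unfold pvStepA pvJoinStepB pvTB pvTransformB pvDots
  simp only [hkne, Bool.true_and, hcast1, hcast2, PySem.List.pyGetD_natCast,
    show ((k : Int) = (ls.length : Int) - 1) ↔ ¬ (k + 1 < ls.length) by omega]
  by_cases hk : k + 1 < ls.length <;> simp [hk, show ¬ k = 0 by omega]

lemma pvCore (ls : List (List Char)) :
    ∀ (m k : Nat) (acc : List (List Char)), k + m = ls.length → 1 ≤ k →
    (PySem.List.enumerate (ls.drop k) (k : Int)).foldl (pvStepA ls) acc
      = ((List.range' k m).map (pvTB ls)).foldl pvJoinStepB acc := by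
  intro m
  induction m with
  | zero =>
    intro k acc hsum _
    have hnil : ls.drop k = [] := by rw [List.drop_eq_nil_iff]; omega
    simp [hnil]
  | succ m ih =>
    intro k acc hsum hk1
    have hklt : k < ls.length := by omega
    rw [List.drop_eq_getElem_cons hklt, PySem.List.enumerate_cons, List.range'_succ]
    simp only [List.map_cons, List.foldl_cons]
    rw [show ls[k] = ls.getD k [] from (pvGetD_eq _ _ _ hklt).symm,
      pvStep_eq ls k acc hk1 hklt,
      show ((k : Int) + 1) = ((k + 1 : Nat) : Int) by push_cast; ring]
    exact ih (k + 1) _ (by omega) (by omega)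

lemma pvFold_eq (ls : List (List Char)) :
    (PySem.List.enumerate ls 0).foldl (pvStepA ls) []
      = ((List.range' 0 ls.length).map (pvTB ls)).foldl pvJoinStepB [] := by
  rcases ls with _ | ⟨x, t⟩
  · rfl
  rw [show ((x :: t).length) = t.length + 1 from rfl, List.range'_succ,
    PySem.List.enumerate_cons]
  simp only [List.map_cons, List.foldl_cons]
  have h0 := pvStep_eq_zero (x :: t) (by simp)
  rw [show (x :: t).getD 0 [] = x by simp] at h0
  rw [h0, show ((0 : Int) + 1) = ((1 : Nat) : Int) by norm_num]
  exact pvCore (x :: t) t.length 1 _ (by simp [Nat.add_comm]) (by omega)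

-- '[x] is a suffix of l' is 'l ends in x'
lemma pvSuffix_single {x : Char} {l : List Char} : [x] <:+ l ↔ l.getLast? = some x := by
  constructor
  · rintro ⟨t, rfl⟩
    simp
  · intro h
    rcases (List.getLast?_eq_some_iff).1 h with ⟨l', rfl⟩
    exact ⟨l', rfl⟩

lemma pvEnds_append (a l : List Char) (h : l ≠ []) :
    PySem.Chars.endswith (a ++ l) ['.'] = PySem.Chars.endswith l ['.'] := by
  rw [Bool.eq_iff_iff, PySem.Chars.endswith_iff, PySem.Chars.endswith_iff,
    pvSuffix_single, pvSuffix_single, List.getLast?_append]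
  cases hl : l.getLast? with
  | none => exact absurd (List.getLast?_eq_none_iff.mp hl) h
  | some y => simp

lemma pvHeadOK_append (l x : List Char) : pvHeadOK (l ++ [' '] ++ x) = pvHeadOK l := by
  rcases l with _ | ⟨c, t⟩
  · simp [pvHeadOK]
    decide
  · simp [pvHeadOK]

-- helper facts for the glue proof
lemma pvHeadOK_ne {l : List Char} (h : pvHeadOK l = true) : l ≠ [] := by
  rcases l with _ | _
  · simp [pvHeadOK] at h
  · simp

lemma pvIsEmpty_concat {α : Type} (a : List α) (x : α) : (a ++ [x]).isEmpty = false := by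
  simp

-- A's loop body, reshaped to the glue condition (Boolean reassociation only)
lemma pvJoin_shape (acc : List (List Char)) (l : List Char) : pvJoinStepB acc l =
    if !acc.isEmpty && pvHeadOK l && !PySem.Chars.endswith (acc.getLastD []) ['.']
    then acc.dropLast ++ [acc.getLastD [] ++ [' '] ++ l] else acc ++ [l] := by
  unfold pvJoinStepB pvHeadOK
  congr 1
  cases l.isEmpty <;> cases acc.isEmpty <;>
    cases PySem.Chars.isalpha (l.headD ' ') <;> cases PySem.Chars.islower (l.headD ' ') <;> simp

lemma pvEnds_cons (a l : List Char) (h : l ≠ []) :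
    PySem.Chars.endswith (a ++ ' ' :: l) ['.'] = PySem.Chars.endswith l ['.'] := by
  rw [show a ++ ' ' :: l = (a ++ [' ']) ++ l by simp, pvEnds_append _ _ h]

lemma pvEnds_cons' (a l : List Char) (h : pvHeadOK l = true) :
    PySem.Chars.endswith (a ++ ' ' :: l) ['.'] = PySem.Chars.endswith l ['.'] :=
  pvEnds_cons a l (pvHeadOK_ne h)

lemma pvHeadOK_cons (l x : List Char) : pvHeadOK (l ++ ' ' :: x) = pvHeadOK l := by
  rw [show l ++ ' ' :: x = l ++ [' '] ++ x by simp, pvHeadOK_append]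

-- one step of A's fold commutes with gluing onto B's back-to-front result
lemma pvGlue_step (acc : List (List Char)) (l : List Char) (out : List (List Char)) :
    pvGlue (pvJoinStepB acc l) out
      = pvGlue acc (if !out.isEmpty && pvHeadOK (out.headD []) && !PySem.Chars.endswith l ['.']
                    then (l ++ [' '] ++ out.headD []) :: out.tail else l :: out) := by
  rw [pvJoin_shape]
  rcases out with _ | ⟨h, tl⟩ <;>
    simp only [pvGlue, List.headD_cons, List.tail_cons, List.isEmpty_nil, List.isEmpty_cons,
      Bool.not_true, Bool.not_false, Bool.false_and, Bool.and_false, Bool.true_and,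
      Bool.and_true, if_false, Bool.false_eq_true] <;>
    split_ifs <;>
    simp_all [pvIsEmpty_concat, pvHeadOK_cons, pvEnds_cons']

-- A's fold and B's back-to-front recursion, related by gluing
lemma pvFold_glue (t : List (List Char)) :
    ∀ acc : List (List Char), t.foldl pvJoinStepB acc = pvGlue acc (pvRecB t) := by
  induction t with
  | nil => intro acc; simp [pvGlue, pvRecB]
  | cons l rest ih =>
    intro acc
    rw [List.foldl_cons, ih (pvJoinStepB acc l), pvGlue_step]
    rfl

-- Source B's reversed loop computes B's back-to-front recursion, reversed
lemma pvRev_fold (t : List (List Char)) :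
    t.reverse.foldl pvRevStep [] = (pvRecB t).reverse := by
  induction t with
  | nil => rfl
  | cons l rest ih =>
    rw [List.reverse_cons, List.foldl_append, ih]
    show pvRevStep ((pvRecB rest).reverse) l = _
    rw [show pvRecB (l :: rest) =
        (if !(pvRecB rest).isEmpty && pvHeadOK ((pvRecB rest).headD []) && !PySem.Chars.endswith l ['.']
         then (l ++ [' '] ++ (pvRecB rest).headD []) :: (pvRecB rest).tail
         else l :: pvRecB rest) from rfl]
    generalize pvRecB rest = out
    rcases out with _ | ⟨h, tl⟩
    · simp [pvRevStep]
    · by_cases hc : (pvHeadOK h && !PySem.Chars.endswith l ['.']) = true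
      · simp [pvRevStep, pvIsEmpty_concat, Bool.and_eq_true_iff.mp hc |>.1,
          by simpa using (Bool.and_eq_true_iff.mp hc).2]
      · have hc' := (Bool.not_eq_true _).mp hc
        simp [pvRevStep, pvIsEmpty_concat, hc']

-- ===== VERDICT (by name: the statement is the Claim_ definition above) =====
theorem clean_subtitles_lines_spec : Claim_equal_clean_subtitles_lines := by
  intro lines _
  unfold Spec_clean_subtitles_lines
  simp only [clean_subtitles_lines, clean_subtitles_lines_alt]
  rw [pvFold_eq, pvRev_fold, List.reverse_reverse, List.range_eq_range', pvFold_glue]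
  simp [pvGlue]
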